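-- pv_equiv track=rewrite | github.com/IvanBailaque/Repaso-EDD-Parcial-1 | Parcial-14-11-17/ej2.py | que_nos_falta
-- ===== SOURCE A (Python) =====
-- def que_nos_falta(libros, libros_en_uso):
--     libros_faltan = dict()
--
--     for materia, lista_libros in libros_en_uso.items():
--         for libro_autor in lista_libros:
--             if libro_autor not in libros.keys():
--                 libros_faltan.setdefault(libro_autor, list())
--                 libros_faltan[libro_autor].append(materia)
--
--     return libros_faltan
-- ===== SOURCE B (Python) =====
-- def que_nos_falta(libros, libros_en_uso):
--     # Flatten to a stream of (libro, materia) events.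
--     pares = [(lib, mat) for mat, lst in libros_en_uso.items() for lib in lst]
--     # Missing books in first-encounter order.
--     faltan = []
--     for lib, _ in pares:
--         if lib not in libros and lib not in faltan:
--             faltan.append(lib)
--     # Gather each missing book's materias by scanning the event stream.
--     return {lib: [mat for l, mat in pares if l == lib] for lib in faltan}
-- ===== Notes on version B (the rewrite author's own statement) =====
-- stated objective: alternative
-- what changed: B flattens libros_en_uso into a stream of (book, subject) events, computes the missing-book keys in first-encounter order with a deduplicating scan, and then builds each book's subject list by a per-key gather over the event stream, instead of A's single nested pass mutating a dict with setdefault/append.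
import Mathlib
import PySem

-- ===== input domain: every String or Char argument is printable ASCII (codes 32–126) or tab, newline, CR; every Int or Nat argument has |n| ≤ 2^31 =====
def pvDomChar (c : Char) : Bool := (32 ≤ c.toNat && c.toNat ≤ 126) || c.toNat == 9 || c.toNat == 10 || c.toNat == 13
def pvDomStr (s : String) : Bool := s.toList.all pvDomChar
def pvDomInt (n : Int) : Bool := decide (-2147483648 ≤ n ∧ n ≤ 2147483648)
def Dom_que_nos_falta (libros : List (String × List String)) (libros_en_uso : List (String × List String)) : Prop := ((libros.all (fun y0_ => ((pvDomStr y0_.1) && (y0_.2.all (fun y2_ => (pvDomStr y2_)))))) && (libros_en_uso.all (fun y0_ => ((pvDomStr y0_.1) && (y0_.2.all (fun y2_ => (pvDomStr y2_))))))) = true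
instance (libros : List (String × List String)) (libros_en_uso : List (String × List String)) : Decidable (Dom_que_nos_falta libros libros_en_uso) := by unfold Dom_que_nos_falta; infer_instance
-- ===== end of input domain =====

-- B replaces A's dict-mutating nested pass by flatten / dedupe-keys / per-key gather (objective: alternative).

-- ===== PORT A =====
-- A: one nested pass over libros_en_uso; books not in the catalog get setdefault + append.
def que_nos_falta (libros : List (String × List String)) (libros_en_uso : List (String × List String)) : List (String × List String) :=
  (libros_en_uso.foldl (fun d pr =>
      pr.2.foldl (fun d la =>
        if !((libros.map (·.1)).contains la) then
          (d.setdefault la []).modify la [] (fun ms => ms ++ [pr.1])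
        else d) d)
    (PySem.Dict.empty : PySem.Dict String (List String))).items

-- ===== PORT B =====
-- B: flatten to (book, subject) events, collect the missing keys in first-encounter order,
-- then gather each key's subjects by scanning the event stream.
def que_nos_falta_alt (libros : List (String × List String)) (libros_en_uso : List (String × List String)) : List (String × List String) :=
  let pares : List (String × String) :=
    libros_en_uso.flatMap (fun pr => pr.2.map (fun lib => (lib, pr.1)))
  let faltan : List String :=
    pares.foldl (fun acc o =>
      if !((libros.map (·.1)).contains o.1) && !(acc.contains o.1) then acc ++ [o.1] else acc) []
  faltan.map (fun lib => (lib, (pares.filter (fun q => q.1 == lib)).map (·.2)))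

-- ===== PRECONDITION & SPEC =====
def Spec_que_nos_falta (libros : List (String × List String)) (libros_en_uso : List (String × List String)) (out : List (String × List String)) : Prop := out = que_nos_falta_alt libros libros_en_uso
instance (libros : List (String × List String)) (libros_en_uso : List (String × List String)) (out : List (String × List String)) : Decidable (Spec_que_nos_falta libros libros_en_uso out) := by unfold Spec_que_nos_falta; infer_instance

-- ===== CLAIM (what is proved, stated in full; the proofs are below) =====
def Claim_equal_que_nos_falta : Prop := ∀ (libros : List (String × List String)) (libros_en_uso : List (String × List String)), Dom_que_nos_falta libros libros_en_uso → Spec_que_nos_falta libros libros_en_uso (que_nos_falta libros libros_en_uso)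

-- ===== LEMMAS AND PROOFS =====

-- setdefault-then-append is an insert of the extended list.
theorem qnf_step_eq (d : PySem.Dict String (List String)) (la : String) (m : String) :
    (d.setdefault la []).modify la [] (fun ms => ms ++ [m])
      = d.insert la (d.getD la [] ++ [m]) := by
  by_cases h : d.contains la = true
  · rw [PySem.Dict.setdefault_of_contains d [] h]
    rfl
  · have h' : d.contains la = false := by simpa using h
    rw [PySem.Dict.setdefault_of_not_contains d [] h']
    show (d.insert la []).insert la ((d.insert la []).getD la [] ++ [m]) = _
    rw [PySem.Dict.getD_insert_self, PySem.Dict.insert_insert_self,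
        PySem.Dict.getD_of_not_contains d [] h']

-- the nested for-loops are a fold over the stream of (book, subject) events
theorem qnf_nested_eq (g : PySem.Dict String (List String) → String × String → PySem.Dict String (List String))
    (l : List (String × List String)) (init : PySem.Dict String (List String)) :
    l.foldl (fun d pr => pr.2.foldl (fun d la => g d (la, pr.1)) d) init
      = (l.flatMap (fun pr => pr.2.map (fun la => (la, pr.1)))).foldl g init := by
  induction l generalizing init with
  | nil => rfl
  | cons pr rest ih =>
    simp [List.foldl_cons, List.flatMap_cons, List.foldl_append, List.foldl_map, ih]

-- firstKeys fold: membership is monotone in the accumulator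
theorem qnf_fk_mono (p : String → Bool) (ops : List (String × String)) (acc : List String)
    (k : String) (h : k ∈ acc) :
    k ∈ ops.foldl (fun acc o => if p o.1 && !(acc.contains o.1) then acc ++ [o.1] else acc) acc := by
  induction ops generalizing acc with
  | nil => exact h
  | cons o rest ih =>
    simp only [List.foldl_cons]
    split
    · exact ih _ (List.mem_append_left _ h)
    · exact ih _ h

-- every member of the firstKeys fold came from the accumulator or satisfies p
theorem qnf_fk_mem (p : String → Bool) (ops : List (String × String)) (acc : List String)
    (k : String)
    (h : k ∈ ops.foldl (fun acc o => if p o.1 && !(acc.contains o.1) then acc ++ [o.1] else acc) acc) :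
    k ∈ acc ∨ p k = true := by
  induction ops generalizing acc with
  | nil => exact Or.inl h
  | cons o rest ih =>
    simp only [List.foldl_cons] at h
    by_cases hc : (p o.1 && !(acc.contains o.1)) = true
    · rw [if_pos hc] at h
      rcases ih _ h with hm | hp
      · rcases List.mem_append.mp hm with hm | hm
        · exact Or.inl hm
        · right
          have hk1 : k = o.1 := by simpa using hm
          rw [hk1]
          simp only [Bool.and_eq_true] at hc
          exact hc.1
      · exact Or.inr hp
    · rw [if_neg hc] at h
      exact ih _ h

-- a p-satisfying key occurring in ops ends up in the firstKeys fold
theorem qnf_fk_occ (p : String → Bool) (ops : List (String × String)) (acc : List String)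
    (k : String) (hp : p k = true) (hocc : k ∈ ops.map (·.1)) :
    k ∈ ops.foldl (fun acc o => if p o.1 && !(acc.contains o.1) then acc ++ [o.1] else acc) acc := by
  induction ops generalizing acc with
  | nil => simp at hocc
  | cons o rest ih =>
    simp only [List.foldl_cons]
    rcases List.mem_map.mp hocc with ⟨q, hq, hk⟩
    rcases List.mem_cons.mp hq with heq | hq'
    · -- the head has key k
      have hk' : o.1 = k := by rw [← heq]; exact hk
      by_cases hc : (p o.1 && !(acc.contains o.1)) = true
      · rw [if_pos hc]
        exact qnf_fk_mono p rest _ k (by simp [hk'])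
      · rw [if_neg hc]
        have hcont : acc.contains o.1 = true := by
          cases hce : acc.contains o.1
          · exfalso
            apply hc
            rw [hk'] at hce ⊢
            rw [hp, hce]
            rfl
          · rfl
        exact qnf_fk_mono p rest _ k (by rw [← hk']; simpa using hcont)
    · exact ih _ (List.mem_map.mpr ⟨q, hq', hk⟩)
-- the firstKeys fold has no duplicates
theorem qnf_fk_nodup (p : String → Bool) (ops : List (String × String)) (acc : List String)
    (h : acc.Nodup) :
    (ops.foldl (fun acc o => if p o.1 && !(acc.contains o.1) then acc ++ [o.1] else acc) acc).Nodup := by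
  induction ops generalizing acc with
  | nil => exact h
  | cons o rest ih =>
    simp only [List.foldl_cons]
    by_cases hc : (p o.1 && !(acc.contains o.1)) = true
    · rw [if_pos hc]
      apply ih
      have hnot : o.1 ∉ acc := by
        simp only [Bool.and_eq_true] at hc
        simpa using hc.2
      refine List.Nodup.append h (List.nodup_singleton _) ?_
      intro a ha hb
      simp only [List.mem_singleton] at hb
      subst hb
      exact hnot ha
    · rw [if_neg hc]
      exact ih _ h

-- main invariant: A's dict state over an event stream, as items, is B's map form
theorem qnf_main (p : String → Bool) (ops : List (String × String)) :
    (ops.foldl (fun d o => if p o.1 then d.insert o.1 (d.getD o.1 [] ++ [o.2]) else d)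
        (PySem.Dict.empty : PySem.Dict String (List String))).items
    = (ops.foldl (fun acc o => if p o.1 && !(acc.contains o.1) then acc ++ [o.1] else acc) []).map
        (fun k => (k, (ops.filter (fun q => q.1 == k)).map (·.2))) := by
  induction ops using List.reverseRecOn with
  | nil => rfl
  | append_singleton ops o ih =>
    rw [List.foldl_append, List.foldl_append]
    simp only [List.foldl_cons, List.foldl_nil]
    set F : List String :=
      ops.foldl (fun acc o => if p o.1 && !(acc.contains o.1) then acc ++ [o.1] else acc) [] with hF
    set S : PySem.Dict String (List String) :=
      ops.foldl (fun d o => if p o.1 then d.insert o.1 (d.getD o.1 [] ++ [o.2]) else d)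
        PySem.Dict.empty with hS
    have hFp : ∀ k ∈ F, p k = true := by
      intro k hk
      rcases qnf_fk_mem p ops [] k hk with h | h
      · simp at h
      · exact h
    have hFnd : F.Nodup := qnf_fk_nodup p ops [] (List.nodup_nil)
    have hkeys : S.keys = F := by
      show S.items.map (·.1) = F
      have hid : ((·.1) ∘ fun k => (k, (ops.filter (fun q => q.1 == k)).map (·.2))) = id := by
        funext x; rfl
      rw [ih, List.map_map, hid, List.map_id]
    have hSnd : S.keys.Nodup := by rw [hkeys]; exact hFnd
    have hcontS : ∀ k, S.contains k = F.contains k := by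
      intro k
      cases hc : F.contains k
      · cases hc2 : S.contains k
        · rfl
        · exfalso
          have hmk := (PySem.Dict.contains_iff_mem_keys S k).mp hc2
          rw [hkeys] at hmk
          have : k ∉ F := by simpa using hc
          exact this hmk
      · rw [(PySem.Dict.contains_iff_mem_keys S k).mpr]
        rw [hkeys]
        simpa using hc
    have hfilter_snoc : ∀ k, (ops ++ [o]).filter (fun q => q.1 == k)
        = ops.filter (fun q => q.1 == k) ++ (if o.1 == k then [o] else []) := by
      intro k
      cases h : o.1 == k <;> simp [List.filter_append, List.filter, h]
    by_cases hp : p o.1 = true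
    · by_cases hc : F.contains o.1 = true
      · -- existing key: in-place update on A's side, unchanged key list on B's side
        have hoF : o.1 ∈ F := by simpa using hc
        have hmemI : (o.1, (ops.filter (fun q => q.1 == o.1)).map (·.2)) ∈ S.items := by
          rw [ih]; exact List.mem_map.mpr ⟨o.1, hoF, rfl⟩
        have hgetD : S.getD o.1 [] = (ops.filter (fun q => q.1 == o.1)).map (·.2) :=
          PySem.Dict.getD_of_mem_items S hmemI hSnd []
        rw [if_pos hp, if_neg (by rw [hc]; simp),
            PySem.Dict.items_insert_of_contains S _ ((hcontS o.1).trans hc), ih, List.map_map]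
        apply List.map_congr_left
        intro k hk
        simp only [Function.comp]
        by_cases hko : k = o.1
        · rw [if_pos (by simp [hko]), hfilter_snoc k, if_pos (by simp [hko])]
          simp [hgetD, hko]
        · rw [if_neg (by simpa using hko), hfilter_snoc k,
              if_neg (by simpa using Ne.symm hko)]
          simp
      · -- new key: appended on both sides
        have hc' : F.contains o.1 = false := by simpa using hc
        have hnotF : o.1 ∉ F := by simpa using hc'
        have hSc : S.contains o.1 = false := (hcontS o.1).trans hc'
        have hempty : ops.filter (fun q => q.1 == o.1) = [] := by
          rw [List.filter_eq_nil_iff]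
          intro q hq hqe
          apply hnotF
          have hmm : o.1 ∈ ops.map (·.1) := by
            refine List.mem_map.mpr ⟨q, hq, ?_⟩
            simpa using hqe
          exact qnf_fk_occ p ops [] o.1 hp hmm
        rw [if_pos hp, if_pos (by rw [hp, hc']; rfl),
            PySem.Dict.items_insert_of_not_contains S _ hSc,
            PySem.Dict.getD_of_not_contains S [] hSc,
            List.map_append, ih]
        congr 1
        · apply List.map_congr_left
          intro k hk
          rw [hfilter_snoc k, if_neg]
          · simp
          · simp only [beq_iff_eq]
            intro he
            exact hnotF (he ▸ hk)
        · simp [hfilter_snoc, hempty]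
    · -- key not missing: both sides ignore the event
      have hp' : p o.1 = false := by simpa using hp
      rw [if_neg (by simp [hp']), if_neg (by rw [hp']; simp), ih]
      apply List.map_congr_left
      intro k hk
      rw [hfilter_snoc k, if_neg]
      · simp
      · simp only [beq_iff_eq]
        intro he
        have hpk := hFp k hk
        rw [he] at hp'
        exact absurd hpk (by simp [hp'])

-- ===== VERDICT (by name: the statement is the Claim_ definition above) =====
theorem que_nos_falta_spec : Claim_equal_que_nos_falta := by
  intro libros libros_en_uso _
  show que_nos_falta libros libros_en_uso = que_nos_falta_alt libros libros_en_uso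
  simp only [que_nos_falta, que_nos_falta_alt]
  have hstepA : (fun (d : PySem.Dict String (List String)) (pr : String × List String) =>
      pr.2.foldl (fun d la =>
        if !((libros.map (·.1)).contains la) then
          (d.setdefault la []).modify la [] (fun ms => ms ++ [pr.1])
        else d) d)
      = (fun d pr => pr.2.foldl (fun d la =>
          (fun d (o : String × String) =>
            if !((libros.map (·.1)).contains o.1) then d.insert o.1 (d.getD o.1 [] ++ [o.2])
            else d) d (la, pr.1)) d) := by
    funext d pr
    congr 1
    funext d la
    beta_reduce
    by_cases hc : (!((libros.map (·.1)).contains la)) = true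
    · rw [if_pos hc, if_pos hc, qnf_step_eq]
    · rw [if_neg hc, if_neg hc]
  rw [hstepA,
      qnf_nested_eq (fun d (o : String × String) =>
        if !((libros.map (·.1)).contains o.1) then d.insert o.1 (d.getD o.1 [] ++ [o.2]) else d)
        libros_en_uso PySem.Dict.empty]
  exact qnf_main (fun k => !((libros.map (·.1)).contains k)) _
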